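-- pv_equiv track=rewrite | github.com/arvidarvidarvid/adventofcode | 2017/day17/day.py | step_and_insert
-- ===== SOURCE A (Python) =====
-- def step_and_insert(step_size, n_inserts=1):
--     circle = [0]
--     position = 0
--     for s in range(1, n_inserts + 1):
--         position = (position + step_size) % s
--         circle.insert(position + 1, s)
--         position += 1
--     return circle
-- ===== SOURCE B (Python) =====
-- def step_and_insert(step_size, n_inserts=1):
--     # Offline, in reverse: first compute every value's insertion rank (its index
--     # among the values <= it in the final circle) from the position recurrence
--     # alone; then place values n..0 back-to-front, each into the rank-th still
--     # free slot of the result (popped from a shrinking list of free slots).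
--     n = n_inserts if n_inserts > 0 else 0
--     ranks = [0]
--     pos = 0
--     for s in range(1, n + 1):
--         pos = (pos + step_size) % s
--         ranks.append(pos + 1)
--         pos += 1
--     free = list(range(n + 1))
--     out = [0] * (n + 1)
--     for s in range(n, -1, -1):
--         out[free.pop(ranks[s])] = s
--     return out
-- ===== Notes on version B (the rewrite author's own statement) =====
-- stated objective: alternative
-- what changed: Instead of forward-simulating the spinlock by splicing each value into the middle of a growing list, B first derives every value's insertion rank from the position recurrence alone and then fills the result in reverse, placing each value into the rank-th still-free slot popped from a shrinking free-slot list.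
import Mathlib
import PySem

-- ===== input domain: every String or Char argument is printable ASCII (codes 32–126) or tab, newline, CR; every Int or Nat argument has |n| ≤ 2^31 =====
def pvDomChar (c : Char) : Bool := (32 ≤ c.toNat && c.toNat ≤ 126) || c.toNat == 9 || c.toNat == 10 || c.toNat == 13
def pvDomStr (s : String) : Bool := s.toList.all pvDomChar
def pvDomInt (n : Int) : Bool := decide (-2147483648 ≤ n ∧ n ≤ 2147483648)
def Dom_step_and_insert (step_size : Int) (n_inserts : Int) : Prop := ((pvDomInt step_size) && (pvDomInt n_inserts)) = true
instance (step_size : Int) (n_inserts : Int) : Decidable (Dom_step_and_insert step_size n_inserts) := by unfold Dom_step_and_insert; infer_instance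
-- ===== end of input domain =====

-- B replaces A's forward simulation (splicing each value into the middle of the
-- growing circle) by an offline two-phase algorithm: compute every value's
-- insertion rank from the position recurrence alone, then place values n..0 in
-- reverse, each into the rank-th still-free slot of the result.
-- Objective: alternative.

-- ===== PORT A =====
-- one loop iteration of A: state = (circle, position)
def pvStepA (step_size : Int) (st : List Int × Int) (s : Int) : List Int × Int :=
  let position := PySem.Int.mod (st.2 + step_size) s
  (PySem.List.insert st.1 (position + 1) s, position + 1)

def step_and_insert (step_size : Int) (n_inserts : Int) : List Int :=
  ((PySem.List.pyRange 1 (n_inserts + 1) 1).foldl (pvStepA step_size) ([0], 0)).1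

-- ===== PORT B =====
-- phase-1 iteration of B: state = (ranks, pos)
def pvRanksStep (step_size : Int) (st : List Int × Int) (s : Int) : List Int × Int :=
  let pos := PySem.Int.mod (st.2 + step_size) s
  (st.1 ++ [pos + 1], pos + 1)

-- phase-2 iteration of B: state = (free, out); out[free.pop(ranks[s])] = s
-- (the none branch is unreachable: Python's free.pop would raise IndexError there)
def pvPlaceStep (ranks : List Int) (st : List Int × List Int) (s : Int) : List Int × List Int :=
  let r := PySem.List.pyGetD ranks s 0
  match PySem.List.pop? st.1 r with
  | some (slot, rest) => (rest, PySem.List.pySetD st.2 slot s)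
  | none => st

def step_and_insert_alt (step_size : Int) (n_inserts : Int) : List Int :=
  let n := if n_inserts > 0 then n_inserts else 0
  let ranks := ((PySem.List.pyRange 1 (n + 1) 1).foldl (pvRanksStep step_size) ([0], 0)).1
  let free := PySem.List.pyRange 0 (n + 1) 1
  let out := List.replicate (n + 1).toNat 0
  ((PySem.List.pyRange n (-1) (-1)).foldl (pvPlaceStep ranks) (free, out)).2

-- ===== PRECONDITION & SPEC =====
def Spec_step_and_insert (step_size : Int) (n_inserts : Int) (out : List Int) : Prop := out = step_and_insert_alt step_size n_inserts
instance (step_size : Int) (n_inserts : Int) (out : List Int) : Decidable (Spec_step_and_insert step_size n_inserts out) := by unfold Spec_step_and_insert; infer_instance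

-- ===== CLAIM (what is proved, stated in full; the proofs are below) =====
def Claim_equal_step_and_insert : Prop := ∀ (step_size : Int) (n_inserts : Int), Dom_step_and_insert step_size n_inserts → Spec_step_and_insert step_size n_inserts (step_and_insert step_size n_inserts)

-- ===== LEMMAS AND PROOFS =====

-- A's position after s iterations (also the insertion index of value s, s ≥ 1)
def pvPos (step_size : Int) : Nat → Int
  | 0 => 0
  | s + 1 => PySem.Int.mod (pvPos step_size s + step_size) ((s : Int) + 1) + 1

-- A's circle after s iterations, written with insertIdx
def pvC (step_size : Int) : Nat → List Int
  | 0 => [0]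
  | s + 1 => (pvC step_size s).insertIdx (pvPos step_size (s + 1)).toNat ((s : Int) + 1)

-- the order-embedding of the remaining free slots after slot j is taken
def pvG (j : Nat) (q : Int) : Int := if q < (j : Int) then q else q + 1

theorem pvPos_nonneg (step_size : Int) (s : Nat) : 0 ≤ pvPos step_size s := by
  cases s with
  | zero => simp [pvPos]
  | succ s =>
    have := PySem.Int.mod_nonneg (pvPos step_size s + step_size) (b := (s : Int) + 1) (by omega)
    unfold pvPos; omega

theorem pvPos_le (step_size : Int) (s : Nat) : pvPos step_size s ≤ (s : Int) := by
  cases s with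
  | zero => simp [pvPos]
  | succ s =>
    have := PySem.Int.mod_lt (pvPos step_size s + step_size) (b := (s : Int) + 1) (by omega)
    unfold pvPos; push_cast; omega

theorem pvC_length (step_size : Int) (s : Nat) : (pvC step_size s).length = s + 1 := by
  induction s with
  | zero => rfl
  | succ s ih =>
    have h1 := pvPos_nonneg step_size (s + 1)
    have h2 := pvPos_le step_size (s + 1)
    unfold pvC
    rw [List.length_insertIdx]
    rw [if_pos (by omega : (pvPos step_size (s+1)).toNat ≤ (pvC step_size s).length), ih]

theorem insertIdx_take_drop (l : List Int) (j : Nat) (x : Int) (h : j ≤ l.length) :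
    l.insertIdx j x = l.take j ++ x :: l.drop j := by
  induction l generalizing j with
  | nil =>
    have : j = 0 := by simpa using h
    subst this; simp
  | cons a t ih =>
    cases j with
    | zero => simp
    | succ j =>
      simp only [List.length_cons, Nat.add_le_add_iff_right] at h
      simp [List.insertIdx_succ_cons, ih j h]

-- A's fold reaches exactly (pvC n, pvPos n)
theorem pvA_fold (step_size : Int) : ∀ n : Nat,
    (PySem.List.pyRange 1 ((n : Int) + 1) 1).foldl (pvStepA step_size) ([0], 0)
      = (pvC step_size n, pvPos step_size n) := by
  intro n
  induction n with
  | zero =>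
    rw [show ((0 : Nat) : Int) + 1 = 1 by simp, PySem.List.pyRange_one_eq_nil (le_refl (1 : Int))]
    rfl
  | succ n ih =>
    have hcast1 : ((n + 1 : Nat) : Int) + 1 = ((n : Int) + 1) + 1 := by push_cast; omega
    rw [hcast1, PySem.List.pyRange_one_succ_right (by omega), List.foldl_append, ih]
    show pvStepA step_size (pvC step_size n, pvPos step_size n) ((n : Int) + 1) = _
    have hpos : PySem.Int.mod (pvPos step_size n + step_size) ((n : Int) + 1) + 1
        = pvPos step_size (n + 1) := rfl
    have h1 := pvPos_nonneg step_size (n + 1)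
    have h2 := pvPos_le step_size (n + 1)
    show (PySem.List.insert (pvC step_size n)
        (PySem.Int.mod (pvPos step_size n + step_size) ((n : Int) + 1) + 1) ((n : Int) + 1), _) = _
    rw [hpos]
    refine Prod.ext ?_ rfl
    show PySem.List.insert (pvC step_size n) (pvPos step_size (n + 1)) ((n : Int) + 1) = _
    have hc : pvPos step_size (n + 1) = (((pvPos step_size (n + 1)).toNat : Nat) : Int) := by omega
    rw [hc, PySem.List.insert_natCast _ _ _ (by rw [pvC_length]; push_cast at h2 ⊢; omega)]
    rw [show pvC step_size (n + 1)
        = (pvC step_size n).insertIdx (pvPos step_size (n + 1)).toNat ((n : Int) + 1) from rfl]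
    rw [insertIdx_take_drop _ _ _ (by rw [pvC_length]; push_cast at h2 ⊢; omega)]

-- B's phase-1 fold computes the list of all positions
theorem pvRanks_fold (step_size : Int) : ∀ n : Nat,
    (PySem.List.pyRange 1 ((n : Int) + 1) 1).foldl (pvRanksStep step_size) ([0], 0)
      = ((List.range (n + 1)).map (fun s => pvPos step_size s), pvPos step_size n) := by
  intro n
  induction n with
  | zero =>
    rw [show ((0 : Nat) : Int) + 1 = 1 by simp, PySem.List.pyRange_one_eq_nil (le_refl (1 : Int))]
    rfl
  | succ n ih =>
    have hcast1 : ((n + 1 : Nat) : Int) + 1 = ((n : Int) + 1) + 1 := by push_cast; omega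
    rw [hcast1, PySem.List.pyRange_one_succ_right (by omega), List.foldl_append, ih]
    show ((List.range (n+1)).map (fun s => pvPos step_size s)
        ++ [PySem.Int.mod (pvPos step_size n + step_size) ((n : Int) + 1) + 1], _) = _
    have hpos : PySem.Int.mod (pvPos step_size n + step_size) ((n : Int) + 1) + 1
        = pvPos step_size (n + 1) := rfl
    rw [hpos]
    conv_rhs => rw [List.range_succ]
    rw [List.map_append]
    simp

theorem pop?_none_of_oob (xs : List Int) (r : Int) (h0 : 0 ≤ r) (h : xs.length ≤ r.toNat) :
    PySem.List.pop? xs r = none := by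
  simp only [PySem.List.pop?, PySem.List.pyIdx?, if_pos h0]
  rw [if_neg (by omega)]
  rfl

theorem set_insertIdx_comm (l : List Int) (j q : Nat) (x v : Int)
    (_hq : q < l.length) (hj : j ≤ l.length) :
    (l.insertIdx j x).set (if q < j then q else q + 1) v = (l.set q v).insertIdx j x := by
  have hlen : ((l.insertIdx j x).set (if q < j then q else q + 1) v).length
      = ((l.set q v).insertIdx j x).length := by
    simp [List.length_insertIdx, hj]
  apply List.ext_getElem hlen
  intro i h1 h2
  simp only [List.getElem_set, List.getElem_insertIdx]
  all_goals split_ifs <;> first | rfl | omega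

theorem eraseIdx_pyRange (m j : Nat) (hj : j ≤ m) :
    (PySem.List.pyRange 0 ((m : Int) + 1) 1).eraseIdx j
      = (PySem.List.pyRange 0 (m : Int) 1).map (pvG j) := by
  have hlenR : (PySem.List.pyRange 0 ((m : Int) + 1) 1).length = m + 1 := by
    rw [PySem.List.length_pyRange_one]; omega
  have hlenr : (PySem.List.pyRange 0 (m : Int) 1).length = m := by
    rw [PySem.List.length_pyRange_one]; omega
  have hlen : ((PySem.List.pyRange 0 ((m : Int) + 1) 1).eraseIdx j).length
      = ((PySem.List.pyRange 0 (m : Int) 1).map (pvG j)).length := by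
    rw [List.length_eraseIdx, List.length_map, hlenR, hlenr, if_pos (by omega)]
    omega
  apply List.ext_getElem hlen
  intro i h1 h2
  rw [List.getElem_eraseIdx, List.getElem_map]
  rw [List.length_eraseIdx, if_pos (by omega), hlenR] at h1
  split_ifs with hcase
  · rw [PySem.List.getElem_pyRange_one _ _ _ (by omega),
      PySem.List.getElem_pyRange_one _ _ _ (by omega)]
    unfold pvG
    split_ifs <;> omega
  · rw [PySem.List.getElem_pyRange_one _ _ _ (by omega),
      PySem.List.getElem_pyRange_one _ _ _ (by omega)]
    unfold pvG
    split_ifs <;> omega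

theorem set_replicate (m j : Nat) (v : Int) (hj : j ≤ m) :
    (List.replicate (m + 1) (0 : Int)).set j v = (List.replicate m (0 : Int)).insertIdx j v := by
  have hlen : ((List.replicate (m + 1) (0 : Int)).set j v).length
      = ((List.replicate m (0 : Int)).insertIdx j v).length := by
    rw [List.length_set, List.length_insertIdx, List.length_replicate, List.length_replicate,
      if_pos hj]
  apply List.ext_getElem hlen
  intro i h1 h2
  rw [List.getElem_set, List.getElem_insertIdx]
  split_ifs <;> first | omega | simp [List.getElem_replicate]

-- placement commutes with taking one slot out through the free-slot embedding
theorem place_commute (ranks : List Int) :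
    ∀ (ops free out : List Int) (j : Nat) (x : Int),
    (∀ q ∈ free, 0 ≤ q ∧ q.toNat < out.length) →
    j ≤ out.length →
    (∀ s ∈ ops, 0 ≤ PySem.List.pyGetD ranks s 0) →
    ops.foldl (pvPlaceStep ranks) (free.map (pvG j), out.insertIdx j x)
      = ((ops.foldl (pvPlaceStep ranks) (free, out)).1.map (pvG j),
         ((ops.foldl (pvPlaceStep ranks) (free, out)).2).insertIdx j x) := by
  intro ops
  induction ops with
  | nil => intro free out j x _ _ _; rfl
  | cons s rest ih =>
    intro free out j x hfree hj hranks
    have hr : 0 ≤ PySem.List.pyGetD ranks s 0 := hranks s (by simp)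
    set r := PySem.List.pyGetD ranks s 0 with hrdef
    rw [List.foldl_cons, List.foldl_cons]
    by_cases hin : r.toNat < free.length
    · -- in-range pop on both sides
      have hrc : r = ((r.toNat : Nat) : Int) := by omega
      have hpop : PySem.List.pop? free r = some (free[r.toNat], free.eraseIdx r.toNat) := by
        have := PySem.List.pop?_natCast free r.toNat hin
        rwa [← hrc] at this
      have hpop' : PySem.List.pop? (free.map (pvG j)) r
          = some (pvG j free[r.toNat], (free.eraseIdx r.toNat).map (pvG j)) := by
        have h := PySem.List.pop?_natCast (free.map (pvG j)) r.toNat (by simpa using hin)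
        rw [← hrc] at h
        rw [h, List.getElem_map, List.eraseIdx_map]
      have hslot := hfree free[r.toNat] (List.getElem_mem _)
      have hstep : pvPlaceStep ranks (free, out) s
          = (free.eraseIdx r.toNat, out.set (free[r.toNat]).toNat s) := by
        show (match PySem.List.pop? free (PySem.List.pyGetD ranks s 0) with
          | some (slot, rest) => (rest, PySem.List.pySetD out slot s)
          | none => (free, out)) = _
        rw [← hrdef, hpop]
        show (free.eraseIdx r.toNat, PySem.List.pySetD out free[r.toNat] s) = _
        rw [PySem.List.pySetD_of_nonneg _ _ hslot.1]
      have hGnonneg : 0 ≤ pvG j free[r.toNat] := by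
        unfold pvG; split_ifs <;> omega
      have hGtoNat : (pvG j free[r.toNat]).toNat
          = if (free[r.toNat]).toNat < j then (free[r.toNat]).toNat else (free[r.toNat]).toNat + 1 := by
        unfold pvG; split_ifs <;> omega
      have hstep' : pvPlaceStep ranks (free.map (pvG j), out.insertIdx j x) s
          = ((free.eraseIdx r.toNat).map (pvG j), (out.set (free[r.toNat]).toNat s).insertIdx j x) := by
        show (match PySem.List.pop? (free.map (pvG j)) (PySem.List.pyGetD ranks s 0) with
          | some (slot, rest) => (rest, PySem.List.pySetD (out.insertIdx j x) slot s)
          | none => (free.map (pvG j), out.insertIdx j x)) = _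
        rw [← hrdef, hpop']
        show ((free.eraseIdx r.toNat).map (pvG j),
          PySem.List.pySetD (out.insertIdx j x) (pvG j free[r.toNat]) s) = _
        rw [PySem.List.pySetD_of_nonneg _ _ hGnonneg, hGtoNat,
          set_insertIdx_comm out j (free[r.toNat]).toNat x s hslot.2 hj]
      rw [hstep, hstep']
      exact ih (free.eraseIdx r.toNat) (out.set (free[r.toNat]).toNat s) j x
        (fun q hq => by
          have := hfree q (List.mem_of_mem_eraseIdx hq)
          rwa [List.length_set])
        (by rwa [List.length_set])
        (fun s' hs' => hranks s' (by simp [hs']))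
    · -- out-of-range pop: both sides step to themselves
      have hpop : PySem.List.pop? free r = none := pop?_none_of_oob free r hr (by omega)
      have hpop' : PySem.List.pop? (free.map (pvG j)) r = none :=
        pop?_none_of_oob _ r hr (by simpa using (by omega : free.length ≤ r.toNat))
      have hstep : pvPlaceStep ranks (free, out) s = (free, out) := by
        show (match PySem.List.pop? free (PySem.List.pyGetD ranks s 0) with
          | some (slot, rest) => (rest, PySem.List.pySetD out slot s)
          | none => (free, out)) = _
        rw [← hrdef, hpop]
      have hstep' : pvPlaceStep ranks (free.map (pvG j), out.insertIdx j x)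
          s = (free.map (pvG j), out.insertIdx j x) := by
        show (match PySem.List.pop? (free.map (pvG j)) (PySem.List.pyGetD ranks s 0) with
          | some (slot, rest) => (rest, PySem.List.pySetD (out.insertIdx j x) slot s)
          | none => (free.map (pvG j), out.insertIdx j x)) = _
        rw [← hrdef, hpop']
      rw [hstep, hstep']
      exact ih free out j x hfree hj (fun s' hs' => hranks s' (by simp [hs']))

-- the reverse placement reconstructs A's circle
theorem place_main (step_size : Int) : ∀ (n : Nat) (ranks : List Int),
    (∀ s : Nat, s ≤ n → PySem.List.pyGetD ranks ((s : Nat) : Int) 0 = pvPos step_size s) →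
    ((PySem.List.pyRange ((n : Nat) : Int) (-1) (-1)).foldl (pvPlaceStep ranks)
        (PySem.List.pyRange 0 ((n : Int) + 1) 1, List.replicate (n + 1) 0)).2
      = pvC step_size n := by
  intro n
  induction n with
  | zero =>
    intro ranks hranks
    have h0 : PySem.List.pyGetD ranks ((0 : Nat) : Int) 0 = 0 := by
      have := hranks 0 (le_refl 0)
      simpa [pvPos] using this
    rw [PySem.List.pyRange_neg_one_cons (by omega : (-1 : Int) < ((0 : Nat) : Int)),
      PySem.List.pyRange_neg_one_eq_nil (by omega)]
    show (pvPlaceStep ranks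
      (PySem.List.pyRange 0 (((0 : Nat) : Int) + 1) 1, List.replicate (0 + 1) 0) ((0 : Nat) : Int)).2
        = pvC step_size 0
    have hstep : pvPlaceStep ranks
        (PySem.List.pyRange 0 (((0 : Nat) : Int) + 1) 1, List.replicate (0 + 1) 0) ((0 : Nat) : Int)
          = ([], [0]) := by
      show (match PySem.List.pop? (PySem.List.pyRange 0 (((0 : Nat) : Int) + 1) 1)
            (PySem.List.pyGetD ranks ((0 : Nat) : Int) 0) with
        | some (slot, rest) => (rest, PySem.List.pySetD (List.replicate (0 + 1) 0) slot ((0 : Nat) : Int))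
        | none => (PySem.List.pyRange 0 (((0 : Nat) : Int) + 1) 1, List.replicate (0 + 1) 0)) = ([], [0])
      rw [h0]
      rfl
    rw [hstep]
    rfl
  | succ n ih =>
    intro ranks hranks
    have hcons : PySem.List.pyRange ((n + 1 : Nat) : Int) (-1) (-1)
        = ((n + 1 : Nat) : Int) :: PySem.List.pyRange ((n : Nat) : Int) (-1) (-1) := by
      have : ((n + 1 : Nat) : Int) - 1 = ((n : Nat) : Int) := by push_cast; omega
      rw [PySem.List.pyRange_neg_one_cons (by push_cast; omega), this]
    rw [hcons, List.foldl_cons]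
    set jI := pvPos step_size (n + 1) with hjIdef
    have hj0 : 0 ≤ jI := pvPos_nonneg step_size (n + 1)
    have hjle : jI ≤ (n : Int) + 1 := by
      have := pvPos_le step_size (n + 1); push_cast at this ⊢; omega
    set jt := jI.toNat with hjtdef
    have hjtle : jt ≤ n + 1 := by omega
    have hrk : PySem.List.pyGetD ranks ((n + 1 : Nat) : Int) 0 = jI := hranks (n + 1) (le_refl _)
    have hlenfree : (PySem.List.pyRange 0 (((n + 1 : Nat) : Int)) 1).length = n + 1 := by
      rw [PySem.List.length_pyRange_one]; omega
    have hlenFree : (PySem.List.pyRange 0 ((((n + 1) : Nat) : Int) + 1) 1).length = n + 2 := by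
      rw [PySem.List.length_pyRange_one]; omega
    have hget : (PySem.List.pyRange 0 ((((n + 1) : Nat) : Int) + 1) 1)[jt]'(by omega) = (jt : Int) := by
      rw [PySem.List.getElem_pyRange_one _ _ _ (by omega)]
      omega
    have hstep : pvPlaceStep ranks
        (PySem.List.pyRange 0 ((((n + 1) : Nat) : Int) + 1) 1, List.replicate (n + 2) 0) ((n + 1 : Nat) : Int)
        = ((PySem.List.pyRange 0 ((n : Int) + 1) 1).map (pvG jt),
           (List.replicate (n + 1) (0 : Int)).insertIdx jt ((n + 1 : Nat) : Int)) := by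
      show (match PySem.List.pop? (PySem.List.pyRange 0 ((((n + 1) : Nat) : Int) + 1) 1)
            (PySem.List.pyGetD ranks ((n + 1 : Nat) : Int) 0) with
        | some (slot, rest) =>
            (rest, PySem.List.pySetD (List.replicate (n + 2) 0) slot ((n + 1 : Nat) : Int))
        | none => (PySem.List.pyRange 0 ((((n + 1) : Nat) : Int) + 1) 1,
            List.replicate (n + 2) 0)) = _
      rw [hrk, show jI = ((jt : Nat) : Int) by omega,
        PySem.List.pop?_natCast _ jt (by omega), hget]
      show ((PySem.List.pyRange 0 ((((n + 1) : Nat) : Int) + 1) 1).eraseIdx jt,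
        PySem.List.pySetD (List.replicate (n + 2) 0) ((jt : Nat) : Int) ((n + 1 : Nat) : Int)) = _
      rw [PySem.List.pySetD_of_nonneg _ _ (by positivity), Int.toNat_natCast,
        set_replicate (n + 1) jt _ hjtle]
      rw [eraseIdx_pyRange (n + 1) jt hjtle,
        show (((n + 1) : Nat) : Int) = ((n : Int) + 1) by push_cast; omega]
    have hcast2 : (((n + 1) : Nat) : Int) + 1 = ((n + 2 : Nat) : Int) := by push_cast; omega
    rw [show (List.replicate ((n + 1) + 1) (0 : Int)) = List.replicate (n + 2) (0 : Int) by rfl]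
    rw [hstep]
    rw [place_commute ranks (PySem.List.pyRange ((n : Nat) : Int) (-1) (-1))
      (PySem.List.pyRange 0 ((n : Int) + 1) 1) (List.replicate (n + 1) 0) jt ((n + 1 : Nat) : Int)
      (fun q hq => by
        rw [PySem.List.mem_pyRange_one] at hq
        constructor
        · exact hq.1
        · rw [List.length_replicate]; omega)
      (by rw [List.length_replicate]; omega)
      (fun s hs => by
        rw [PySem.List.mem_pyRange_neg_one] at hs
        have hsnn : 0 ≤ s := by omega
        have : s = ((s.toNat : Nat) : Int) := by omega
        rw [this, hranks s.toNat (by omega)]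
        exact pvPos_nonneg step_size s.toNat)]
    rw [ih ranks (fun s hs => hranks s (by omega))]
    show (pvC step_size n).insertIdx jt ((n + 1 : Nat) : Int) = pvC step_size (n + 1)
    rw [show pvC step_size (n + 1)
        = (pvC step_size n).insertIdx (pvPos step_size (n + 1)).toNat ((n : Int) + 1) from rfl,
      show ((n + 1 : Nat) : Int) = (n : Int) + 1 by push_cast; omega]

theorem pv_main (step_size n_inserts : Int) :
    step_and_insert step_size n_inserts = step_and_insert_alt step_size n_inserts := by
  by_cases hn : n_inserts ≤ 0
  · have hnil : PySem.List.pyRange 1 (n_inserts + 1) 1 = [] :=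
      PySem.List.pyRange_one_eq_nil (by omega)
    unfold step_and_insert step_and_insert_alt
    rw [hnil, if_neg (by omega)]
    rfl
  · set N := n_inserts.toNat with hNdef
    have hN : n_inserts = ((N : Nat) : Int) := by omega
    unfold step_and_insert step_and_insert_alt
    rw [if_pos (by omega), hN, pvA_fold step_size N]
    show pvC step_size N = ((PySem.List.pyRange ((N : Nat) : Int) (-1) (-1)).foldl
        (pvPlaceStep (((PySem.List.pyRange 1 (((N : Nat) : Int) + 1) 1).foldl
          (pvRanksStep step_size) ([0], 0)).1))
        (PySem.List.pyRange 0 (((N : Nat) : Int) + 1) 1,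
         List.replicate ((((N : Nat) : Int)) + 1).toNat 0)).2
    rw [pvRanks_fold step_size N,
      show ((((N : Nat) : Int)) + 1).toNat = N + 1 by omega]
    exact (place_main step_size N ((List.range (N + 1)).map (fun s => pvPos step_size s))
      (fun s hs => by
        rw [PySem.List.pyGetD_natCast]
        exact PySem.List.getD_map_range _ _ _ _ (by omega))).symm

-- ===== VERDICT (by name: the statement is the Claim_ definition above) =====
theorem step_and_insert_spec : Claim_equal_step_and_insert := by
  intro s n _
  unfold Spec_step_and_insert
  exact pv_main s n
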